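-- pv_equiv track=rewrite | github.com/PhNyx/jenkins-mcp | log_parser.py | extract_error_block
-- ===== SOURCE A (Python) =====
-- def extract_error_block(log_text, max_lines=1000, keywords=None):
--     """
--     Extracts relevant error lines from a Jenkins log, surrounding each match with context.
--     """
--     if keywords is None:
--         keywords = ["ERROR", "Exception", "Traceback", "FAILED", "Build failed", "Segmentation fault"]
--
--     lines = log_text.splitlines()
--     extracted = []
--     added_indices = set()
--
--     for i, line in enumerate(lines):
--         if any(k.lower() in line.lower() for k in keywords):
--             start = max(0, i - 10)
--             end = min(len(lines), i + 20)
--             for j in range(start, end):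
--                 if j not in added_indices:
--                     extracted.append(lines[j])
--                     added_indices.add(j)
--
--     # Trim to max_lines
--     return "\n".join(extracted[-max_lines:])
-- ===== SOURCE B (Python) =====
-- def extract_error_block(log_text, max_lines=1000, keywords=None):
--     """Two-phase rewrite: precompute per-line keyword hits, then keep line j
--     iff some hit line i has j inside its context window [i-10, i+20)."""
--     if keywords is None:
--         keywords = ["ERROR", "Exception", "Traceback", "FAILED", "Build failed", "Segmentation fault"]
--
--     lines = log_text.splitlines()
--     n = len(lines)
--     kws = [k.lower() for k in keywords]
--     hits = [any(k in line.lower() for k in kws) for line in lines]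
--     kept = [lines[j] for j in range(n)
--             if any(hits[i] for i in range(max(0, j - 19), min(n, j + 11)))]
--     return "\n".join(kept[-max_lines:])
-- ===== Notes on version B (the rewrite author's own statement) =====
-- stated objective: alternative
-- what changed: Replaced A's single pass with interleaved per-window appends guarded by a growing dedup set by a two-phase plan: precompute a boolean hits list per line, then one ascending comprehension keeps line j iff an inverted context window [max(0,j-19), min(n,j+11)) contains a hit, with no set and no nested dedup appends.
import Mathlib
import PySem

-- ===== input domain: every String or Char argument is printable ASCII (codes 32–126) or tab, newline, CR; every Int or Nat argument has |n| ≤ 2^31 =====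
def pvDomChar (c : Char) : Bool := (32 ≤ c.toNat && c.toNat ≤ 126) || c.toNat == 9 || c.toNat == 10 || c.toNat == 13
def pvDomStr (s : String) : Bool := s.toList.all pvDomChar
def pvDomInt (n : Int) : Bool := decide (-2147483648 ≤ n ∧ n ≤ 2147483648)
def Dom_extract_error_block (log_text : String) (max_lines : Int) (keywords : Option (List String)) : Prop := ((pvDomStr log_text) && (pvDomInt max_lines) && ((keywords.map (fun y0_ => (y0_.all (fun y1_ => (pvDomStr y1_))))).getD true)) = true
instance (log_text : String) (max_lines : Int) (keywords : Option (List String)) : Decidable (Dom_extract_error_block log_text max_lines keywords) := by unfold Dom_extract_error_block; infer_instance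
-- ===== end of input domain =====

-- B is a two-phase rewrite of A (same cost): precompute per-line keyword hits, then keep line j
-- iff an inverted context window around j contains a hit; no dedup set, no interleaved appends.

-- ===== PORT A =====
def pvDefaultKeywords : List String :=
  ["ERROR", "Exception", "Traceback", "FAILED", "Build failed", "Segmentation fault"]

-- body of A's inner `for j in range(start, end)` loop
def pvAInnerStep (lines : List String) (st2 : List String × PySem.Set Int) (j : Int) :
    List String × PySem.Set Int :=
  if PySem.Set.contains st2.2 j then st2
  else (st2.1 ++ [(PySem.List.pyGet? lines j).getD ""], PySem.Set.add st2.2 j)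

-- body of A's outer `for i, line in enumerate(lines)` loop
def pvAStep (lines : List String) (kws : List String) (st : List String × PySem.Set Int)
    (p : Int × String) : List String × PySem.Set Int :=
  if kws.any (fun k => PySem.Str.isIn (PySem.Str.lower k) (PySem.Str.lower p.2)) then
    (PySem.List.pyRange (max 0 (p.1 - 10)) (min (lines.length : Int) (p.1 + 20)) 1).foldl
      (pvAInnerStep lines) st
  else st

def extract_error_block (log_text : String) (max_lines : Int) (keywords : Option (List String)) : String :=
  let kws := keywords.getD pvDefaultKeywords
  let lines := PySem.Str.splitlines log_text
  let st := (PySem.List.enumerate lines 0).foldl (pvAStep lines kws) ([], PySem.Set.empty)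
  PySem.Str.join "\n" (PySem.List.slice st.1 (some (-max_lines)) none)

-- ===== PORT B =====
def extract_error_block_alt (log_text : String) (max_lines : Int) (keywords : Option (List String)) : String :=
  let kws0 := keywords.getD pvDefaultKeywords
  let lines := PySem.Str.splitlines log_text
  let n : Int := lines.length
  let kws := kws0.map PySem.Str.lower
  let hits := lines.map (fun line => kws.any (fun k => PySem.Str.isIn k (PySem.Str.lower line)))
  let kept := ((PySem.List.pyRange 0 n 1).filter
      (fun j => (PySem.List.pyRange (max 0 (j - 19)) (min n (j + 11)) 1).any
        (fun i => (PySem.List.pyGet? hits i).getD false))).map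
      (fun j => (PySem.List.pyGet? lines j).getD "")
  PySem.Str.join "\n" (PySem.List.slice kept (some (-max_lines)) none)

-- ===== PRECONDITION & SPEC =====
def Spec_extract_error_block (log_text : String) (max_lines : Int) (keywords : Option (List String)) (out : String) : Prop := out = extract_error_block_alt log_text max_lines keywords
instance (log_text : String) (max_lines : Int) (keywords : Option (List String)) (out : String) : Decidable (Spec_extract_error_block log_text max_lines keywords out) := by unfold Spec_extract_error_block; infer_instance

-- ===== CLAIM (what is proved, stated in full; the proofs are below) =====
def Claim_equal_extract_error_block : Prop := ∀ (log_text : String) (max_lines : Int) (keywords : Option (List String)), Dom_extract_error_block log_text max_lines keywords → Spec_extract_error_block log_text max_lines keywords (extract_error_block log_text max_lines keywords)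

-- ===== LEMMAS AND PROOFS =====

-- does line i of `lines` contain one of the keywords (case-insensitively)?
def pvHit (lines : List String) (kws : List String) (i : Nat) : Bool :=
  kws.any (fun k => PySem.Str.isIn (PySem.Str.lower k) (PySem.Str.lower (lines.getD i "")))

-- is index j inside the context window of some matching line i < m?
def pvCov (lines : List String) (kws : List String) (m : Nat) (j : Int) : Bool :=
  (List.range m).any (fun i => pvHit lines kws i &&
    decide (max 0 ((i : Int) - 10) ≤ j) && decide (j < min (lines.length : Int) ((i : Int) + 20)))

def pvGet (lines : List String) (j : Int) : String := (PySem.List.pyGet? lines j).getD ""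

-- the lines at the covered indices, in ascending index order
def pvExt (lines : List String) (kws : List String) (m : Nat) : List String :=
  ((PySem.List.pyRange 0 (lines.length : Int) 1).filter (pvCov lines kws m)).map (pvGet lines)

lemma pvCov_succ (lines kws : List String) (m : Nat) (j : Int) :
    pvCov lines kws (m + 1) j =
      (pvCov lines kws m j || (pvHit lines kws m &&
        decide (max 0 ((m : Int) - 10) ≤ j) && decide (j < min (lines.length : Int) ((m : Int) + 20)))) := by
  simp [pvCov, List.range_succ]

-- the covered set is downward closed above the start of the current window
lemma pvCov_down (lines kws : List String) (m : Nat) {a b : Int}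
    (ha : pvCov lines kws m a = true) (hsb : max 0 ((m : Int) - 10) ≤ b) (hba : b ≤ a) :
    pvCov lines kws m b = true := by
  simp only [pvCov, List.any_eq_true, List.mem_range, Bool.and_eq_true, decide_eq_true_eq] at ha ⊢
  obtain ⟨i, him, ⟨hh, h1⟩, h2⟩ := ha
  exact ⟨i, him, ⟨hh, by omega⟩, by omega⟩

-- A's inner dedup loop: appends the not-yet-covered indices, unions the window into the set
lemma pvInner (lines : List String) (L : List Int) (hL : L.Nodup)
    (st : List String × PySem.Set Int) (hnd : st.2.Nodup) :
    (L.foldl (pvAInnerStep lines) st).1 =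
      st.1 ++ (L.filter (fun j => !PySem.Set.contains st.2 j)).map (pvGet lines) ∧
    (∀ j, j ∈ (L.foldl (pvAInnerStep lines) st).2 ↔ (j ∈ st.2 ∨ j ∈ L)) ∧
    (L.foldl (pvAInnerStep lines) st).2.Nodup := by
  induction L generalizing st with
  | nil => exact ⟨by simp, by simp, hnd⟩
  | cons a L ih =>
    obtain ⟨haL, hLnd⟩ := List.nodup_cons.mp hL
    simp only [List.foldl_cons]
    by_cases hc : PySem.Set.contains st.2 a = true
    · have hstep : pvAInnerStep lines st a = st := by unfold pvAInnerStep; rw [if_pos hc]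
      rw [hstep]
      obtain ⟨i1, i2, i3⟩ := ih hLnd st hnd
      refine ⟨?_, ?_, i3⟩
      · rw [i1, List.filter_cons]
        simp [(PySem.Set.contains_iff st.2 a).mp hc]
      · intro j
        rw [i2 j]
        have hmem : a ∈ st.2 := (PySem.Set.contains_iff st.2 a).mp hc
        constructor
        · rintro (h | h)
          · exact Or.inl h
          · exact Or.inr (List.mem_cons_of_mem _ h)
        · rintro (h | h)
          · exact Or.inl h
          · rcases List.mem_cons.mp h with rfl | h
            · exact Or.inl hmem
            · exact Or.inr h
    · have hstep : pvAInnerStep lines st a =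
          (st.1 ++ [(PySem.List.pyGet? lines a).getD ""], PySem.Set.add st.2 a) := by
        unfold pvAInnerStep; rw [if_neg hc]
      rw [hstep]
      obtain ⟨i1, i2, i3⟩ := ih hLnd
        (st.1 ++ [(PySem.List.pyGet? lines a).getD ""], PySem.Set.add st.2 a)
        (PySem.Set.nodup_add st.2 a hnd)
      refine ⟨?_, ?_, i3⟩
      · rw [i1]
        have hfc : L.filter (fun j => !PySem.Set.contains (PySem.Set.add st.2 a) j) =
            L.filter (fun j => !PySem.Set.contains st.2 j) := by
          apply List.filter_congr
          intro j hj
          have hja : j ≠ a := fun h => haL (h ▸ hj)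
          congr 1
          rw [Bool.eq_iff_iff, PySem.Set.contains_iff, PySem.Set.contains_iff, PySem.Set.mem_add]
          exact ⟨fun h => h.elim id (fun h' => absurd h' hja), Or.inl⟩
        rw [hfc, List.filter_cons]
        simp only [hc]
        simp [pvGet]
      · intro j
        rw [i2 j, PySem.Set.mem_add]
        constructor
        · rintro ((h | rfl) | h)
          · exact Or.inl h
          · exact Or.inr (List.mem_cons_self ..)
          · exact Or.inr (List.mem_cons_of_mem _ h)
        · rintro (h | h)
          · exact Or.inl (Or.inl h)
          · rcases List.mem_cons.mp h with rfl | h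
            · exact Or.inl (Or.inr rfl)
            · exact Or.inr h

-- the ordering fact: splitting the covered indices at step m's window keeps ascending order
lemma pvFilterSplit (lines kws : List String) (m : Nat) (hm : pvHit lines kws m = true) :
    (PySem.List.pyRange 0 (lines.length : Int) 1).filter (pvCov lines kws (m + 1)) =
      (PySem.List.pyRange 0 (lines.length : Int) 1).filter (pvCov lines kws m) ++
      (PySem.List.pyRange (max 0 ((m : Int) - 10)) (min (lines.length : Int) ((m : Int) + 20)) 1).filter
        (fun j => !pvCov lines kws m j) := by
  have pw0 := PySem.List.pairwise_lt_pyRange_one 0 (lines.length : Int)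
  have pww := PySem.List.pairwise_lt_pyRange_one (max 0 ((m : Int) - 10)) (min (lines.length : Int) ((m : Int) + 20))
  have pwL : (List.filter (pvCov lines kws (m + 1)) (PySem.List.pyRange 0 (lines.length : Int) 1)).Pairwise (· < ·) :=
    pw0.sublist List.filter_sublist
  have pw1 : (List.filter (pvCov lines kws m) (PySem.List.pyRange 0 (lines.length : Int) 1)).Pairwise (· < ·) :=
    pw0.sublist List.filter_sublist
  have pw2 : (List.filter (fun j => !pvCov lines kws m j)
      (PySem.List.pyRange (max 0 ((m : Int) - 10)) (min (lines.length : Int) ((m : Int) + 20)) 1)).Pairwise (· < ·) :=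
    pww.sublist List.filter_sublist
  have cross : ∀ a ∈ List.filter (pvCov lines kws m) (PySem.List.pyRange 0 (lines.length : Int) 1),
      ∀ b ∈ List.filter (fun j => !pvCov lines kws m j)
        (PySem.List.pyRange (max 0 ((m : Int) - 10)) (min (lines.length : Int) ((m : Int) + 20)) 1), a < b := by
    intro a ha b hb
    obtain ⟨ha1, ha2⟩ := List.mem_filter.mp ha
    obtain ⟨hb1, hb2⟩ := List.mem_filter.mp hb
    obtain ⟨hbl, hbr⟩ := PySem.List.mem_pyRange_one.mp hb1
    by_contra hab
    have : pvCov lines kws m b = true := pvCov_down lines kws m ha2 hbl (by omega)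
    simp [this] at hb2
  have pwR : ((List.filter (pvCov lines kws m) (PySem.List.pyRange 0 (lines.length : Int) 1)) ++
      (List.filter (fun j => !pvCov lines kws m j)
        (PySem.List.pyRange (max 0 ((m : Int) - 10)) (min (lines.length : Int) ((m : Int) + 20)) 1))).Pairwise (· < ·) :=
    List.pairwise_append.mpr ⟨pw1, pw2, cross⟩
  have ndL : (List.filter (pvCov lines kws (m + 1)) (PySem.List.pyRange 0 (lines.length : Int) 1)).Nodup :=
    pwL.imp (fun h => ne_of_lt h)
  have ndR := pwR.imp (fun {a b} (h : a < b) => ne_of_lt h)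
  have hmem : ∀ x, x ∈ List.filter (pvCov lines kws (m + 1)) (PySem.List.pyRange 0 (lines.length : Int) 1) ↔
      x ∈ (List.filter (pvCov lines kws m) (PySem.List.pyRange 0 (lines.length : Int) 1)) ++
        (List.filter (fun j => !pvCov lines kws m j)
          (PySem.List.pyRange (max 0 ((m : Int) - 10)) (min (lines.length : Int) ((m : Int) + 20)) 1)) := by
    intro x
    simp only [List.mem_append, List.mem_filter, PySem.List.mem_pyRange_one, pvCov_succ, hm,
      Bool.true_and, Bool.or_eq_true, Bool.and_eq_true, decide_eq_true_eq, Bool.not_eq_eq_eq_not,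
      Bool.not_true]
    constructor
    · rintro ⟨⟨h0, hn⟩, hc | ⟨h1, h2⟩⟩
      · exact Or.inl ⟨⟨h0, hn⟩, hc⟩
      · by_cases hc : pvCov lines kws m x = true
        · exact Or.inl ⟨⟨h0, hn⟩, hc⟩
        · exact Or.inr ⟨⟨h1, h2⟩, by simpa using hc⟩
    · rintro (⟨⟨h0, hn⟩, hc⟩ | ⟨⟨h1, h2⟩, hc⟩)
      · exact ⟨⟨h0, hn⟩, Or.inl hc⟩
      · exact ⟨⟨by omega, by omega⟩, Or.inr ⟨h1, h2⟩⟩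
  exact (List.perm_ext_iff_of_nodup ndL ndR).mpr hmem |>.eq_of_pairwise
    (fun a b _ _ h1 h2 => absurd h2 (not_lt_of_gt h1)) pwL pwR

-- main invariant of A's outer loop: extracted is the covered indices in ascending order
lemma pvMain (lines kws : List String) (m : Nat) :
    (((PySem.List.pyRange 0 (m : Int) 1).map (fun j => (j, PySem.List.pyGetD lines j ""))).foldl
        (pvAStep lines kws) ([], PySem.Set.empty)).1 = pvExt lines kws m ∧
    (∀ j, j ∈ (((PySem.List.pyRange 0 (m : Int) 1).map (fun j => (j, PySem.List.pyGetD lines j ""))).foldl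
        (pvAStep lines kws) ([], PySem.Set.empty)).2 ↔ pvCov lines kws m j = true) ∧
    (((PySem.List.pyRange 0 (m : Int) 1).map (fun j => (j, PySem.List.pyGetD lines j ""))).foldl
        (pvAStep lines kws) ([], PySem.Set.empty)).2.Nodup := by
  induction m with
  | zero =>
    rw [PySem.List.pyRange_one_eq_nil (by omega)]
    refine ⟨?_, ?_, ?_⟩
    · simp [pvExt, pvCov]
    · intro j; simp [PySem.Set.empty, pvCov]
    · simp [PySem.Set.empty]
  | succ m ih =>
    obtain ⟨ih1, ih2, ih3⟩ := ih
    have hcast : ((m + 1 : Nat) : Int) = (m : Int) + 1 := by push_cast; ring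
    rw [hcast, PySem.List.pyRange_one_succ_right (by omega), List.map_append, List.foldl_append]
    simp only [List.map_cons, List.map_nil, List.foldl_cons, List.foldl_nil]
    set F := ((PySem.List.pyRange 0 (m : Int) 1).map (fun j => (j, PySem.List.pyGetD lines j ""))).foldl
        (pvAStep lines kws) ([], PySem.Set.empty) with hF
    have hgd : PySem.List.pyGetD lines (m : Int) "" = lines.getD m "" := PySem.List.pyGetD_natCast lines m ""
    have htest : (kws.any (fun k => PySem.Str.isIn (PySem.Str.lower k)
        (PySem.Str.lower (PySem.List.pyGetD lines (m : Int) "")))) = pvHit lines kws m := by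
      rw [hgd]; rfl
    by_cases hh : pvHit lines kws m = true
    · have hstep : pvAStep lines kws F ((m : Int), PySem.List.pyGetD lines (m : Int) "") =
          (PySem.List.pyRange (max 0 ((m : Int) - 10)) (min (lines.length : Int) ((m : Int) + 20)) 1).foldl
            (pvAInnerStep lines) F := by
        unfold pvAStep; rw [htest, hh]; simp
      rw [hstep]
      obtain ⟨e1, e2, e3⟩ := pvInner lines _ (PySem.List.nodup_pyRange_one _ _) F ih3
      refine ⟨?_, ?_, e3⟩
      · rw [e1, ih1]
        have hfc : (PySem.List.pyRange (max 0 ((m : Int) - 10)) (min (lines.length : Int) ((m : Int) + 20)) 1).filter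
              (fun j => !PySem.Set.contains F.2 j) =
            (PySem.List.pyRange (max 0 ((m : Int) - 10)) (min (lines.length : Int) ((m : Int) + 20)) 1).filter
              (fun j => !pvCov lines kws m j) := by
          apply List.filter_congr
          intro j _
          congr 1
          rw [Bool.eq_iff_iff, PySem.Set.contains_iff]
          exact ih2 j
        rw [hfc]
        unfold pvExt
        rw [pvFilterSplit lines kws m hh, List.map_append]
      · intro j
        rw [e2 j, ih2 j, pvCov_succ, PySem.List.mem_pyRange_one]
        simp [hh]
    · have hstep : pvAStep lines kws F ((m : Int), PySem.List.pyGetD lines (m : Int) "") = F := by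
        unfold pvAStep; rw [htest]
        simp [hh]
      rw [hstep]
      have hcoveq : ∀ j, pvCov lines kws (m + 1) j = pvCov lines kws m j := by
        intro j; rw [pvCov_succ]
        simp [hh]
      refine ⟨?_, ?_, ih3⟩
      · rw [ih1]; unfold pvExt
        congr 1
        exact List.filter_congr (fun j _ => (hcoveq j).symm)
      · intro j; rw [ih2 j, hcoveq j]

-- reading B's hits list at a valid index is A's per-line keyword test
lemma pvHits_get (lines kws : List String) (i : Int) (h0 : 0 ≤ i) (hn : i < (lines.length : Int)) :
    ((PySem.List.pyGet? (lines.map (fun line => (kws.map PySem.Str.lower).any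
      (fun k => PySem.Str.isIn k (PySem.Str.lower line)))) i).getD false) = pvHit lines kws i.toNat := by
  have hk : i.toNat < lines.length := by omega
  rw [PySem.List.pyGet?_of_nonneg _ h0]
  rw [List.getElem?_map, List.getElem?_eq_getElem hk]
  simp only [Option.map_some, Option.getD_some]
  rw [List.any_map]
  unfold pvHit
  rw [List.getD_eq_getElem lines "" hk]
  rfl

-- B's inverted-window test agrees with coverage by the full pass
lemma pvBany (lines kws : List String) (j : Int) (h0 : 0 ≤ j) (hn : j < (lines.length : Int)) :
    ((PySem.List.pyRange (max 0 (j - 19)) (min (lines.length : Int) (j + 11)) 1).any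
      (fun i => (PySem.List.pyGet? (lines.map (fun line => (kws.map PySem.Str.lower).any
        (fun k => PySem.Str.isIn k (PySem.Str.lower line)))) i).getD false)) =
    pvCov lines kws lines.length j := by
  rw [Bool.eq_iff_iff, List.any_eq_true]
  unfold pvCov
  rw [List.any_eq_true]
  constructor
  · rintro ⟨i, hi, hp⟩
    obtain ⟨hlo, hhi⟩ := PySem.List.mem_pyRange_one.mp hi
    have h0i : 0 ≤ i := by omega
    have hin : i < (lines.length : Int) := by omega
    refine ⟨i.toNat, List.mem_range.mpr (by omega), ?_⟩
    rw [pvHits_get lines kws i h0i hin] at hp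
    simp only [Bool.and_eq_true, decide_eq_true_eq]
    exact ⟨⟨hp, by omega⟩, by omega⟩
  · rintro ⟨k, hk, hp⟩
    have hk' : k < lines.length := List.mem_range.mp hk
    simp only [Bool.and_eq_true, decide_eq_true_eq] at hp
    obtain ⟨⟨hh, h1⟩, h2⟩ := hp
    refine ⟨(k : Int), PySem.List.mem_pyRange_one.mpr (by omega), ?_⟩
    rw [pvHits_get lines kws (k : Int) (by omega) (by omega)]
    simpa using hh

-- ===== VERDICT (by name: the statement is the Claim_ definition above) =====
theorem extract_error_block_spec : Claim_equal_extract_error_block := by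
  intro log_text max_lines keywords _
  unfold Spec_extract_error_block extract_error_block extract_error_block_alt
  set lines := PySem.Str.splitlines log_text with hlines
  set kws := keywords.getD pvDefaultKeywords with hkws
  have henum : PySem.List.enumerate lines 0 =
      (PySem.List.pyRange 0 (lines.length : Int) 1).map (fun j => (j, PySem.List.pyGetD lines j "")) :=
    PySem.List.enumerate_eq_map_pyRange lines ""
  obtain ⟨m1, _, _⟩ := pvMain lines kws lines.length
  have hA : ((PySem.List.enumerate lines 0).foldl (pvAStep lines kws) ([], PySem.Set.empty)).1 =
      pvExt lines kws lines.length := by rw [henum]; exact m1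
  have hB : ((PySem.List.pyRange 0 (lines.length : Int) 1).filter
      (fun j => (PySem.List.pyRange (max 0 (j - 19)) (min (lines.length : Int) (j + 11)) 1).any
        (fun i => (PySem.List.pyGet? (lines.map (fun line => (kws.map PySem.Str.lower).any
          (fun k => PySem.Str.isIn k (PySem.Str.lower line)))) i).getD false))).map
      (fun j => (PySem.List.pyGet? lines j).getD "") = pvExt lines kws lines.length := by
    unfold pvExt
    congr 1
    apply List.filter_congr
    intro j hj
    obtain ⟨h0, hn⟩ := PySem.List.mem_pyRange_one.mp hj
    exact pvBany lines kws j h0 hn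
  dsimp only
  rw [hA, hB]
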